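-- pv_equiv track=rewrite | github.com/3s-rg/komet | cdn/orchestrator/func2.py | last_hundred_unique_items
-- ===== SOURCE A (Python) =====
-- import typing
--
-- def last_hundred_unique_items(lst: typing.List[str]) -> typing.Set[str]:
--     seen = set()
--     unique_items = set()
--
--     for item in reversed(lst):
--         if item not in seen:
--             seen.add(item)
--             unique_items.add(item)
--         if len(unique_items) == 500:
--             break
--
--     return unique_items
-- ===== SOURCE B (Python) =====
-- import typing
--
-- def last_hundred_unique_items(lst: typing.List[str]) -> typing.Set[str]:
--     last_pos = {}
--     for i, item in enumerate(lst):
--         last_pos[item] = i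
--     most_recent = sorted(last_pos, key=last_pos.get, reverse=True)
--     return set(most_recent[:500])
-- ===== Notes on version B (the rewrite author's own statement) =====
-- stated objective: alternative
-- what changed: Instead of scanning the list in reverse accumulating seen/unique sets with an early break at 500, B makes one forward pass building a dict of each item's last-occurrence index, then sorts the keys by that index descending and takes the first 500.
import Mathlib
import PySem

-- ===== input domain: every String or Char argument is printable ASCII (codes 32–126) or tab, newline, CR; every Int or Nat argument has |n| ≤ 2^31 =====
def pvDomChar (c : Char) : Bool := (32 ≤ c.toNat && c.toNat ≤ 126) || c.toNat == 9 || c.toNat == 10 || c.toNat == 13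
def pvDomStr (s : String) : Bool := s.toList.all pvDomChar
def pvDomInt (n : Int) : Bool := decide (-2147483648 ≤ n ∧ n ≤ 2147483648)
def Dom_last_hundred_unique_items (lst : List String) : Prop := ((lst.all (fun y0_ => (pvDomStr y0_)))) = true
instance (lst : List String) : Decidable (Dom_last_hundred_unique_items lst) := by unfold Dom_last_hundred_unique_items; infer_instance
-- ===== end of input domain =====

-- B replaces A's reverse-scan seen/unique accumulation (with early exit at 500) by a different
-- algorithm: one forward pass recording each item's LAST occurrence index in a dict, then a
-- descending sort of the keys by that index and a slice of the first 500 (objective: alternative).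

-- ===== PORT A =====
-- the 'for item in reversed(lst): …' loop with its break, carrying (seen, unique_items)
def pvLoopA : List String → PySem.Set String → PySem.Set String → PySem.Set String
  | [], _, unique => unique
  | item :: rest, seen, unique =>
    if PySem.Set.contains seen item then
      if PySem.Set.len unique == 500 then unique else pvLoopA rest seen unique
    else
      let seen' := PySem.Set.add seen item
      let unique' := PySem.Set.add unique item
      if PySem.Set.len unique' == 500 then unique' else pvLoopA rest seen' unique'

def last_hundred_unique_items (lst : List String) : List String :=
  pvLoopA lst.reverse PySem.Set.empty PySem.Set.empty

-- ===== PORT B =====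
-- 'for i, item in enumerate(lst): last_pos[item] = i', carrying the counter i
def pvLastPos : List String → Int → PySem.Dict String Int → PySem.Dict String Int
  | [], _, d => d
  | item :: rest, i, d => pvLastPos rest (i + 1) (d.insert item i)

def last_hundred_unique_items_alt (lst : List String) : List String :=
  -- last_pos after the loop; most_recent = sorted(last_pos, key=last_pos.get, reverse=True)
  -- (last_pos.get on its own keys is the stored value, ported as getD _ 0); set(most_recent[:500])
  PySem.Set.ofList ((PySem.List.sorted (pvLastPos lst 0 PySem.Dict.empty).keys
    (fun k => (pvLastPos lst 0 PySem.Dict.empty).getD k 0) true).take 500)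

-- ===== PRECONDITION & SPEC =====
def Spec_last_hundred_unique_items (lst : List String) (out : List String) : Prop := out = last_hundred_unique_items_alt lst
instance (lst : List String) (out : List String) : Decidable (Spec_last_hundred_unique_items lst out) := by unfold Spec_last_hundred_unique_items; infer_instance

-- ===== CLAIM (what is proved, stated in full; the proofs are below) =====
def Claim_equal_last_hundred_unique_items : Prop := ∀ (lst : List String), Dom_last_hundred_unique_items lst → Spec_last_hundred_unique_items lst (last_hundred_unique_items lst)

-- ===== LEMMAS AND PROOFS =====

-- ---- A-side: the loop returns the first 500 first-occurrences of its input ----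

-- folding Set.add only appends: the accumulator is a prefix of the result
theorem foldl_add_prefix (l : List String) (acc : PySem.Set String) :
    ∃ t, l.foldl PySem.Set.add acc = acc ++ t := by
  induction l generalizing acc with
  | nil => exact ⟨[], by simp⟩
  | cons x rest ih =>
    obtain ⟨t, ht⟩ := ih (PySem.Set.add acc x)
    rw [PySem.Set.add_eq_ite] at ht
    by_cases hx : x ∈ acc
    · rw [if_pos hx] at ht
      exact ⟨t, by rw [List.foldl_cons, PySem.Set.add_eq_ite, if_pos hx]; exact ht⟩
    · rw [if_neg hx] at ht
      refine ⟨x :: t, ?_⟩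
      rw [List.foldl_cons, PySem.Set.add_eq_ite, if_neg hx, ht]
      simp

-- invariant of A's loop: started with seen = unique = acc (distinct, fewer than 500 elements),
-- it returns the first 500 elements of the full dedup continuation
theorem pvLoopA_eq_take (l : List String) : ∀ (acc : PySem.Set String), acc.length < 500 →
    pvLoopA l acc acc = (l.foldl PySem.Set.add acc).take 500 := by
  induction l with
  | nil =>
    intro acc h
    simp [pvLoopA, List.take_of_length_le (Nat.le_of_lt h)]
  | cons x rest ih =>
    intro acc h
    by_cases hx : x ∈ acc
    · have hc : PySem.Set.contains acc x = true := by simp [hx]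
      have hlen : (PySem.Set.len acc == (500 : Int)) = false := by
        simp only [PySem.Set.len, beq_eq_false_iff_ne, ne_eq]
        intro hcast
        omega
      simp only [pvLoopA, hc, if_true, hlen, Bool.false_eq_true, if_false]
      rw [List.foldl_cons, PySem.Set.add_of_mem hx]
      exact ih acc h
    · have hc : PySem.Set.contains acc x = false := by simp [hx]
      have hadd : PySem.Set.add acc x = acc ++ [x] := PySem.Set.add_of_not_mem hx
      simp only [pvLoopA, hc, Bool.false_eq_true, if_false, hadd]
      by_cases h500 : acc.length + 1 = 500
      · have hlen : ((PySem.Set.len (acc ++ [x]) : Int) == (500 : Int)) = true := by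
          simp [PySem.Set.len]; omega
        simp only [hlen, if_true]
        rw [List.foldl_cons, hadd]
        obtain ⟨t, ht⟩ := foldl_add_prefix rest (acc ++ [x])
        rw [ht, ← h500]
        have : acc.length + 1 = (acc ++ [x]).length := by simp
        rw [this, List.take_left]
      · have hlen : ((PySem.Set.len (acc ++ [x]) : Int) == (500 : Int)) = false := by
          simp [PySem.Set.len]; omega
        simp only [hlen, Bool.false_eq_true, if_false]
        rw [List.foldl_cons, hadd]
        exact ih (acc ++ [x]) (by simp; omega)

-- ---- B-side: the last-position dict, characterised by one induction ----

-- the dict keeps distinct keys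
theorem pvLastPos_nodup_keys (l : List String) : ∀ (i : Int) (d : PySem.Dict String Int),
    d.keys.Nodup → (pvLastPos l i d).keys.Nodup := by
  induction l with
  | nil => intro i d h; exact h
  | cons x rest ih =>
    intro i d h
    exact ih (i + 1) (d.insert x i) (PySem.Dict.nodup_keys_insert d x i h)

-- the one invariant the final assembly needs: values of listed keys lie in [i, i+len),
-- unlisted keys are untouched, and along ofList l.reverse the stored values strictly decrease
theorem pvLastPos_inv (l : List String) : ∀ (i : Int) (d : PySem.Dict String Int),
    (∀ k ∈ l, ∃ v, (pvLastPos l i d).get? k = some v ∧ i ≤ v ∧ v < i + l.length) ∧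
    (∀ k, k ∉ l → (pvLastPos l i d).get? k = d.get? k) ∧
    (PySem.Set.ofList l.reverse).Pairwise
      (fun a b => (pvLastPos l i d).getD b 0 < (pvLastPos l i d).getD a 0) := by
  induction l with
  | nil =>
    intro i d
    refine ⟨by simp, fun k _ => rfl, by simp [PySem.Set.ofList]⟩
  | cons x rest ih =>
    intro i d
    obtain ⟨hin, hout, hpw⟩ := ih (i + 1) (d.insert x i)
    have hD : pvLastPos (x :: rest) i d = pvLastPos rest (i + 1) (d.insert x i) := rfl
    -- value stored for x in the final dict
    have hxval : ∀ (_ : x ∉ rest), (pvLastPos (x :: rest) i d).get? x = some i := by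
      intro hnx
      rw [hD, hout x hnx, PySem.Dict.get?_insert_self]
    refine ⟨?_, ?_, ?_⟩
    · -- values of listed keys
      intro k hk
      rcases List.mem_cons.mp hk with hkx | hkr
      · subst hkx
        by_cases hxr : k ∈ rest
        · obtain ⟨v, hv, h1, h2⟩ := hin k hxr
          exact ⟨v, by rw [hD]; exact hv, by omega, by simp at h2 ⊢; omega⟩
        · exact ⟨i, hxval hxr, le_refl i, by simp only [List.length_cons]; omega⟩
      · obtain ⟨v, hv, h1, h2⟩ := hin k hkr
        exact ⟨v, by rw [hD]; exact hv, by omega, by simp at h2 ⊢; omega⟩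
    · -- unlisted keys untouched
      intro k hk
      have hkx : k ≠ x := fun h => hk (h ▸ List.mem_cons_self ..)
      have hkr : k ∉ rest := fun h => hk (List.mem_cons_of_mem _ h)
      rw [hD, hout k hkr, PySem.Dict.get?_insert_of_ne d i hkx]
    · -- pairwise decreasing along ofList (rest.reverse ++ [x])
      have hrev : (x :: rest).reverse = rest.reverse ++ [x] := by simp
      rw [hrev, PySem.Set.ofList_eq_foldl, List.foldl_append, ← PySem.Set.ofList_eq_foldl]
      simp only [List.foldl_cons, List.foldl_nil]
      rw [PySem.Set.add_eq_ite]
      by_cases hx : x ∈ PySem.Set.ofList rest.reverse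
      · rw [if_pos hx]; rw [hD]; exact hpw
      · rw [if_neg hx]
        rw [hD]
        refine List.pairwise_append.mpr ⟨hpw, List.pairwise_singleton _ _, ?_⟩
        intro a ha b hb
        have hb' : b = x := by simpa using hb
        rw [hb']
        have har : a ∈ rest := by
          have := (PySem.Set.mem_ofList rest.reverse a).mp ha
          simpa using this
        have hxr : x ∉ rest := by
          intro hc
          exact hx ((PySem.Set.mem_ofList rest.reverse x).mpr (by simpa using hc))
        obtain ⟨v, hv, h1, _⟩ := hin a har
        have hDa : (pvLastPos rest (i + 1) (d.insert x i)).getD a 0 = v := by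
          rw [PySem.Dict.getD_eq_get?_getD, hv]; rfl
        have hDx : (pvLastPos rest (i + 1) (d.insert x i)).getD x 0 = i := by
          rw [PySem.Dict.getD_eq_get?_getD, hout x hxr, PySem.Dict.get?_insert_self]; rfl
        rw [hDa, hDx]
        omega

-- membership in the dict's keys is membership in the input
theorem pvLastPos_mem_keys (lst : List String) (k : String) :
    k ∈ (pvLastPos lst 0 PySem.Dict.empty).keys ↔ k ∈ lst := by
  obtain ⟨hin, hout, _⟩ := pvLastPos_inv lst 0 PySem.Dict.empty
  constructor
  · intro hk
    by_contra hkl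
    have := hout k hkl
    rw [PySem.Dict.get?_empty] at this
    exact ((PySem.Dict.get?_eq_none_iff_not_mem_keys _ k).mp this) hk
  · intro hk
    obtain ⟨v, hv, _, _⟩ := hin k hk
    by_contra hc
    rw [(PySem.Dict.get?_eq_none_iff_not_mem_keys _ k).mpr hc] at hv
    simp at hv

-- B's descending sort of the last-position keys IS the reverse-order dedup of the input
theorem sorted_keys_eq_ofList_reverse (lst : List String) :
    PySem.List.sorted (pvLastPos lst 0 PySem.Dict.empty).keys
      (fun k => (pvLastPos lst 0 PySem.Dict.empty).getD k 0) true
    = PySem.Set.ofList lst.reverse := by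
  apply PySem.List.sorted_rev_eq_of_perm_of_pairwise_gt
  · refine (List.perm_ext_iff_of_nodup (PySem.Set.nodup_ofList _)
      (pvLastPos_nodup_keys lst 0 PySem.Dict.empty (by simp [PySem.Dict.empty, PySem.Dict.keys]))).mpr ?_
    intro a
    rw [PySem.Set.mem_ofList, List.mem_reverse, pvLastPos_mem_keys]
  · exact (pvLastPos_inv lst 0 PySem.Dict.empty).2.2

-- ===== VERDICT (by name: the statement is the Claim_ definition above) =====
theorem last_hundred_unique_items_spec : Claim_equal_last_hundred_unique_items := by
  intro lst _
  unfold Spec_last_hundred_unique_items last_hundred_unique_items last_hundred_unique_items_alt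
  rw [pvLoopA_eq_take lst.reverse PySem.Set.empty (by simp [PySem.Set.empty])]
  have h1 : lst.reverse.foldl PySem.Set.add PySem.Set.empty = PySem.Set.ofList lst.reverse := by
    rw [PySem.Set.ofList_eq_foldl]; rfl
  rw [h1, sorted_keys_eq_ofList_reverse]
  have hnd : ((PySem.Set.ofList lst.reverse).take 500).Nodup :=
    (PySem.Set.nodup_ofList lst.reverse).sublist (List.take_sublist _ _)
  exact (PySem.Set.ofList_eq_self_of_nodup _ hnd).symm
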